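-- pv_equiv track=rewrite | github.com/SaadRasheed-exe/Q-Learning-Dungeon-Game | src/core/visualizer.py | _group_states_by_condition
-- ===== SOURCE A (Python) =====
-- def _group_states_by_condition(q_table):
--     groups = {}
--     for state, actions in q_table.items():
--         if len(state) == 4:
--             _, _, c1, c2 = state
--             condition = f"{int(c1)}{int(c2)} keys"
--         else:
--             condition = "default"
--
--         if condition not in groups:
--             groups[condition] = {}
--         groups[condition][state] = actions
--
--     return groups
-- ===== SOURCE B (Python) =====
-- def _group_states_by_condition(q_table):
--     def condition_of(state):
--         if len(state) == 4:
--             return f"{int(state[2])}{int(state[3])} keys"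
--         return "default"
--
--     conditions = dict.fromkeys(condition_of(state) for state in q_table)
--     return {
--         cond: {state: actions for state, actions in q_table.items()
--                if condition_of(state) == cond}
--         for cond in conditions
--     }
-- ===== Notes on version B (the rewrite author's own statement) =====
-- stated objective: simpler
-- what changed: Replaces the on-the-fly hash grouping (mutating nested dicts per item) with a two-phase decomposition: one pass collects the distinct condition keys in first-appearance order, then a dict comprehension builds each group by filtering the table for that condition.
import Mathlib
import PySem

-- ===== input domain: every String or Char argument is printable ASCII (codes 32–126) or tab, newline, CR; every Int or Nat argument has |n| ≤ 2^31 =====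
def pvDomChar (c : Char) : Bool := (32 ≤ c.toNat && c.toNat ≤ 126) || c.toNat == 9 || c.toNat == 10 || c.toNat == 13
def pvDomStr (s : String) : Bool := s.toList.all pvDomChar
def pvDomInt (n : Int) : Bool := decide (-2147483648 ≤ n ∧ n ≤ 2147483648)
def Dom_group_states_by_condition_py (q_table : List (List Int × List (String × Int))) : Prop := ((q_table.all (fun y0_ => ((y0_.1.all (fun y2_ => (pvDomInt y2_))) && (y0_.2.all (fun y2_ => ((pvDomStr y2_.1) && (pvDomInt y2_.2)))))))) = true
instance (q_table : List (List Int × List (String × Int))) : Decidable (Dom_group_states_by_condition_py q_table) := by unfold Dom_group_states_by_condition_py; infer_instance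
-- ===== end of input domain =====

-- B replaces A's on-the-fly nested-dict grouping with a two-phase decomposition (dedup the condition keys in first-appearance order, then build each group by filtering); objective: simpler.


-- ===== PORT A =====
-- A's condition string: tuple unpack of a length-4 state, f"{int(c1)}{int(c2)} keys", else "default"
def condA (state : List Int) : String :=
  match state with
  | [_, _, c1, c2] => PySem.Int.toStr c1 ++ PySem.Int.toStr c2 ++ " keys"
  | _ => "default"

-- one iteration of A's loop body (groups[condition] created if absent, then groups[condition][state] = actions)
def stepA (groups : PySem.Dict String (PySem.Dict (List Int) (List (String × Int))))
    (sa : List Int × List (String × Int)) :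
    PySem.Dict String (PySem.Dict (List Int) (List (String × Int))) :=
  let condition := condA sa.1
  let g1 := if groups.contains condition then groups
            else groups.insert condition PySem.Dict.empty
  g1.insert condition ((g1.getD condition PySem.Dict.empty).insert sa.1 sa.2)

def group_states_by_condition_py (q_table : List (List Int × List (String × Int))) :
    List (String × List (List Int × List (String × Int))) :=
  ((q_table.foldl stepA PySem.Dict.empty).items).map (fun p => (p.1, p.2.items))

-- ===== PORT B =====
-- B's condition helper: length test plus index access, as in Source B (the getD 0 only makes the in-range access total)
def condB (state : List Int) : String :=
  if state.length = 4 then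
    PySem.Int.toStr (state[2]?.getD 0) ++ PySem.Int.toStr (state[3]?.getD 0) ++ " keys"
  else "default"

def group_states_by_condition_py_alt (q_table : List (List Int × List (String × Int))) :
    List (String × List (List Int × List (String × Int))) :=
  let conditions := PySem.List.dedup (q_table.map (fun sa => condB sa.1))
  conditions.map (fun cond => (cond, q_table.filter (fun sa => condB sa.1 == cond)))

-- ===== PRECONDITION & SPEC =====
-- Pre_ excludes association lists with duplicate state keys: A's argument is a Python dict, whose
-- keys are necessarily distinct, so a duplicate-key list represents no actual input of A.
def Pre_group_states_by_condition_py (q_table : List (List Int × List (String × Int))) : Prop :=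
  (q_table.map Prod.fst).Nodup
instance (q_table : List (List Int × List (String × Int))) : Decidable (Pre_group_states_by_condition_py q_table) := by unfold Pre_group_states_by_condition_py; infer_instance

def pvWitness_group_states_by_condition_py : (List (List Int × List (String × Int))) :=
  [([0, 1, 1, 0], [("up", 1)]), ([1, 2], [("down", 0)]), ([0, 0, 1, 0], [("up", 2)])]

def Spec_group_states_by_condition_py (q_table : List (List Int × List (String × Int))) (out : List (String × List (List Int × List (String × Int)))) : Prop := out = group_states_by_condition_py_alt q_table
instance (q_table : List (List Int × List (String × Int))) (out : List (String × List (List Int × List (String × Int)))) : Decidable (Spec_group_states_by_condition_py q_table out) := by unfold Spec_group_states_by_condition_py; infer_instance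

-- ===== CLAIM (what is proved, stated in full; the proofs are below) =====
def Claim_equal_group_states_by_condition_py : Prop := ∀ (q_table : List (List Int × List (String × Int))), Dom_group_states_by_condition_py q_table → Pre_group_states_by_condition_py q_table → Spec_group_states_by_condition_py q_table (group_states_by_condition_py q_table)

-- ===== LEMMAS AND PROOFS =====

theorem condB_eq (s : List Int) : condB s = condA s := by
  match s with
  | [] => rfl
  | [_] => rfl
  | [_, _] => rfl
  | [_, _, _] => rfl
  | [_, _, _, _] => rfl
  | _ :: _ :: _ :: _ :: _ :: rest => simp [condB, condA]

def rhsD (l : List (List Int × List (String × Int))) :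
    PySem.Dict String (PySem.Dict (List Int) (List (String × Int))) :=
  PySem.Dict.mk ((PySem.List.dedup (l.map (fun sa => condA sa.1))).map
    (fun c => (c, PySem.Dict.mk (l.filter (fun sa => condA sa.1 == c)))))

theorem keys_rhsD (l : List (List Int × List (String × Int))) :
    (rhsD l).keys = PySem.List.dedup (l.map (fun sa => condA sa.1)) := by
  simp [rhsD, PySem.Dict.keys_mk, List.map_map, Function.comp_def]

theorem nodup_keys_rhsD (l : List (List Int × List (String × Int))) :
    (rhsD l).keys.Nodup := by
  rw [keys_rhsD]; exact PySem.List.nodup_dedup _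

theorem contains_rhsD (l : List (List Int × List (String × Int))) (c : String) :
    (rhsD l).contains c = decide (c ∈ l.map (fun sa => condA sa.1)) := by
  rw [PySem.Dict.contains_eq_decide_mem_keys, keys_rhsD]
  simp

theorem dedup_append_singleton (xs : List String) (a : String) :
    PySem.List.dedup (xs ++ [a]) =
      if a ∈ xs then PySem.List.dedup xs else PySem.List.dedup xs ++ [a] := by
  rw [PySem.List.dedup_eq_ofList, PySem.Set.ofList_append, PySem.Set.update_cons,
    PySem.Set.update_nil, PySem.List.dedup_eq_ofList]
  simp only [PySem.Set.add]
  split_ifs with h1 h2 <;> first | rfl | simp_all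

theorem pv_step (l : List (List Int × List (String × Int)))
    (x : List Int × List (String × Int)) (hx : x.1 ∉ l.map Prod.fst) :
    stepA (rhsD l) x = rhsD (l ++ [x]) := by
  by_cases hm : condA x.1 ∈ l.map (fun sa => condA sa.1)
  · -- condition already present
    have hcont : (rhsD l).contains (condA x.1) = true := by
      rw [contains_rhsD]; simpa using hm
    have hgetD : (rhsD l).getD (condA x.1) PySem.Dict.empty
        = PySem.Dict.mk (l.filter (fun sa => condA sa.1 == condA x.1)) := by
      apply PySem.Dict.getD_of_mem_items (d := rhsD l)
      · exact List.mem_map.mpr ⟨condA x.1, (PySem.List.mem_dedup _ _).mpr hm, rfl⟩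
      · exact nodup_keys_rhsD l
    have hinner : (PySem.Dict.mk (l.filter (fun sa => condA sa.1 == condA x.1))).contains x.1 = false := by
      rw [PySem.Dict.contains_eq_decide_mem_keys]
      simp only [PySem.Dict.keys_mk, decide_eq_false_iff_not]
      intro hmem
      obtain ⟨p, hp, hpe⟩ := List.mem_map.mp hmem
      exact hx (List.mem_map.mpr ⟨p, List.mem_of_mem_filter hp, hpe⟩)
    have hinner2 : (PySem.Dict.mk (l.filter (fun sa => condA sa.1 == condA x.1))).insert x.1 x.2
        = PySem.Dict.mk (l.filter (fun sa => condA sa.1 == condA x.1) ++ [x]) := by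
      apply PySem.Dict.ext
      rw [PySem.Dict.items_insert_of_not_contains _ _ hinner]
    apply PySem.Dict.ext
    simp only [stepA, hcont, if_pos, hgetD, hinner2]
    rw [PySem.Dict.items_insert_of_contains _ _ hcont]
    simp only [rhsD, List.map_append, List.map_map]
    simp only [List.map_cons, List.map_nil]
    rw [dedup_append_singleton _ _, if_pos hm]
    apply List.map_congr_left
    intro c hc
    by_cases hcx : c = condA x.1
    · subst hcx
      simp [List.filter_append]
    · have : (c == condA x.1) = false := by simpa using hcx
      simp [List.filter_append, Ne.symm hcx, hcx]
  · -- new condition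
    have hcont : (rhsD l).contains (condA x.1) = false := by
      rw [contains_rhsD]; simpa using hm
    have hfl : l.filter (fun sa => condA sa.1 == condA x.1) = [] := by
      rw [List.filter_eq_nil_iff]
      intro sa hsa
      simp only [beq_iff_eq]
      exact fun h => hm (List.mem_map.mpr ⟨sa, hsa, h⟩)
    have hinner2 : (PySem.Dict.empty (κ := List Int) (ν := List (String × Int))).insert x.1 x.2
        = PySem.Dict.mk [x] := by
      apply PySem.Dict.ext
      rw [PySem.Dict.items_insert_of_not_contains _ _ (PySem.Dict.contains_empty _)]
      rfl
    apply PySem.Dict.ext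
    simp only [stepA, hcont, Bool.false_eq_true, if_false,
      PySem.Dict.getD_insert_self, hinner2]
    rw [PySem.Dict.items_insert_of_contains _ _ (PySem.Dict.contains_insert_self _ _ _)]
    rw [PySem.Dict.items_insert_of_not_contains _ _ hcont]
    simp only [rhsD, List.map_append, List.map_map]
    simp only [List.map_cons, List.map_nil]
    rw [dedup_append_singleton _ _, if_neg hm]
    rw [List.map_append]
    congr 1
    · apply List.map_congr_left
      intro c hc
      have hcx : c ≠ condA x.1 := by
        intro h; exact hm (by rw [← h]; exact (PySem.List.mem_dedup _ _).mp hc)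
      simp [List.filter_append, hcx, Ne.symm hcx]
    · simp [List.filter_append, hfl]

theorem pv_main (l : List (List Int × List (String × Int)))
    (h : (l.map Prod.fst).Nodup) :
    l.foldl stepA PySem.Dict.empty = rhsD l := by
  induction l using List.reverseRecOn with
  | nil => rfl
  | append_singleton l x ih =>
      rw [List.map_append, List.map_cons, List.map_nil] at h
      have h1 : (l.map Prod.fst).Nodup := h.of_append_left
      have h2 : x.1 ∉ l.map Prod.fst := by
        have := List.disjoint_of_nodup_append h
        intro hmem; exact this hmem (by simp)
      rw [List.foldl_append, List.foldl_cons, List.foldl_nil, ih h1, pv_step l x h2]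

-- ===== VERDICT (by name: the statement is the Claim_ definition above) =====
theorem group_states_by_condition_py_spec : Claim_equal_group_states_by_condition_py := by
  intro q_table _ hpre
  unfold Spec_group_states_by_condition_py group_states_by_condition_py group_states_by_condition_py_alt
  rw [pv_main q_table hpre]
  simp [rhsD, List.map_map, condB_eq, Function.comp_def]
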